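-- pv_equiv track=rewrite | github.com/mcagriardic/Search-Sort-Algorithms | ctci/alternating_pairs.py | is_valid_postcode
-- ===== SOURCE A (Python) =====
-- def is_valid_postcode(p):
--   if p < 100000 or p > 999999:
--     return False
--   p = str(p)
--   for i in range(2,len(p)):
--     if p[i-2] == p[i]:
--       return False
--
--   return True
-- ===== SOURCE B (Python) =====
-- def _has_adjacent_duplicate(sub):
--     return any(a == b for a, b in zip(sub, sub[1:]))
--
--
-- def is_valid_postcode(p):
--     if p < 100000 or p > 999999:
--         return False
--     even, odd, on_even = [], [], True
--     for c in str(p):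
--         if on_even:
--             even.append(c)
--         else:
--             odd.append(c)
--         on_even = not on_even
--     return not _has_adjacent_duplicate(even) and not _has_adjacent_duplicate(odd)
-- ===== Notes on version B (the rewrite author's own statement) =====
-- stated objective: alternative
-- what changed: A makes one stride-2 index scan comparing s[i-2] with s[i]; B instead splits the digit string into the even- and odd-position subsequences in one pass and checks each subsequence for an adjacent duplicate.
import Mathlib
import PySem

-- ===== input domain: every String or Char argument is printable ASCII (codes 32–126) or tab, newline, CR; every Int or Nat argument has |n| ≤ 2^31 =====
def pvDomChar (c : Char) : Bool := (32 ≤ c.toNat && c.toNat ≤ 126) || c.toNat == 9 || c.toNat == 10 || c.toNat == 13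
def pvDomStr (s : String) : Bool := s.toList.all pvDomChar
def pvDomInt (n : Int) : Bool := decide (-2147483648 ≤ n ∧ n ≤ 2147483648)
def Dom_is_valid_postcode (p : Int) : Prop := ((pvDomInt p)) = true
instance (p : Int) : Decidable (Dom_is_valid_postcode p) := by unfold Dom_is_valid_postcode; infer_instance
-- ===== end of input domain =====

-- B replaces A's single stride-2 index scan by splitting the digits into the even- and
-- odd-position subsequences and checking each for an adjacent duplicate (objective: alternative decomposition).

-- ===== PORT A =====
-- literal transliteration of A: range guard, s = str(p), for i in range(2, len(s)): if s[i-2] == s[i]: return False; return True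
def is_valid_postcode (p : Int) : Bool :=
  if p < 100000 || p > 999999 then false
  else
    let s := PySem.Int.toChars p
    if (PySem.List.pyRange 2 (s.length : Int) 1).any
        (fun i => PySem.List.pyGet? s (i - 2) == PySem.List.pyGet? s i) then false
    else true

-- ===== PORT B =====
-- helper: any(a == b for a, b in zip(sub, sub[1:]))
def pvHasAdjacentDuplicate (sub : List Char) : Bool :=
  (sub.zip (List.drop 1 sub)).any (fun ab => ab.1 == ab.2)

-- literal transliteration of B: same range guard; one pass over str(p) distributing the chars
-- into even/odd position lists with a toggling flag; then the two adjacent-duplicate checks.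
def is_valid_postcode_alt (p : Int) : Bool :=
  if p < 100000 || p > 999999 then false
  else
    let r := (PySem.Int.toChars p).foldl
      (fun (acc : List Char × List Char × Bool) c =>
        let (even, odd, onEven) := acc
        if onEven then (even ++ [c], odd, !onEven) else (even, odd ++ [c], !onEven))
      ([], [], true)
    !pvHasAdjacentDuplicate r.1 && !pvHasAdjacentDuplicate r.2.1

-- ===== PRECONDITION & SPEC =====
def Spec_is_valid_postcode (p : Int) (out : Bool) : Prop := out = is_valid_postcode_alt p
instance (p : Int) (out : Bool) : Decidable (Spec_is_valid_postcode p out) := by unfold Spec_is_valid_postcode; infer_instance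

-- ===== CLAIM (what is proved, stated in full; the proofs are below) =====
def Claim_equal_is_valid_postcode : Prop := ∀ (p : Int), Dom_is_valid_postcode p → Spec_is_valid_postcode p (is_valid_postcode p)

-- ===== LEMMAS AND PROOFS =====

-- the even/odd-position split, as a structural recursion (proof-side mirror of B's loop)
def pvSplitAlt : List Char → List Char × List Char
  | [] => ([], [])
  | x :: xs => ((x :: (pvSplitAlt xs).2), (pvSplitAlt xs).1)

-- A's scan, as a structural recursion (proof-side mirror of A's loop)
def pvChk : List Char → Bool
  | [] => false
  | x :: xs =>
    match xs with
    | _ :: c :: _ => (x == c) || pvChk xs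
    | _ => false

theorem pvChk_cons3 (a b c : Char) (t : List Char) :
    pvChk (a :: b :: c :: t) = ((a == c) || pvChk (b :: c :: t)) := rfl

-- B's loop computes the even/odd split
theorem pvFoldl_split (cs : List Char) : ∀ (e o : List Char) (b : Bool),
    cs.foldl
      (fun (acc : List Char × List Char × Bool) c =>
        let (even, odd, onEven) := acc
        if onEven then (even ++ [c], odd, !onEven) else (even, odd ++ [c], !onEven))
      (e, o, b)
    = (e ++ (if b then (pvSplitAlt cs).1 else (pvSplitAlt cs).2),
       o ++ (if b then (pvSplitAlt cs).2 else (pvSplitAlt cs).1),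
       b ^^ (cs.length % 2 == 1)) := by
  induction cs with
  | nil => intro e o b; simp [pvSplitAlt]
  | cons x xs ih =>
    intro e o b
    cases b <;> simp [pvSplitAlt, List.foldl_cons, ih, List.append_assoc, Nat.add_mod] <;>
      rcases Nat.mod_two_eq_zero_or_one xs.length with h | h <;> simp [h]

theorem pvHasAdj_cons_cons (x y : Char) (t : List Char) :
    pvHasAdjacentDuplicate (x :: y :: t) = ((x == y) || pvHasAdjacentDuplicate (y :: t)) := by
  simp [pvHasAdjacentDuplicate]

-- A's recursion equals the two split checks
theorem pvChk_eq_split : ∀ (s : List Char),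
    pvChk s = (pvHasAdjacentDuplicate (pvSplitAlt s).1 || pvHasAdjacentDuplicate (pvSplitAlt s).2)
  | [] => by simp [pvChk, pvSplitAlt, pvHasAdjacentDuplicate]
  | [a] => by simp [pvChk, pvSplitAlt, pvHasAdjacentDuplicate]
  | [a, b] => by simp [pvChk, pvSplitAlt, pvHasAdjacentDuplicate]
  | a :: b :: c :: t => by
    have ih := pvChk_eq_split (b :: c :: t)
    rw [pvChk_cons3, ih]
    show _ = (pvHasAdjacentDuplicate (a :: c :: (pvSplitAlt t).2) ||
              pvHasAdjacentDuplicate (b :: (pvSplitAlt (c :: t)).2))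
    rw [pvHasAdj_cons_cons]
    show (a == c || (pvHasAdjacentDuplicate (b :: (pvSplitAlt (c :: t)).2) ||
          pvHasAdjacentDuplicate (c :: (pvSplitAlt t).2))) = _
    cases a == c <;> cases pvHasAdjacentDuplicate (c :: (pvSplitAlt t).2) <;>
      cases pvHasAdjacentDuplicate (b :: (pvSplitAlt (c :: t)).2) <;> simp

-- A's range-any scan, re-indexed over Nat, equals pvChk
theorem pvAnyNat_eq_chk : ∀ (s : List Char),
    ((List.range (s.length - 2)).any (fun k => s[k]? == s[k + 2]?)) = pvChk s
  | [] => by simp [pvChk]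
  | [a] => by simp [pvChk]
  | [a, b] => by simp [pvChk]
  | a :: b :: c :: t => by
    have ih := pvAnyNat_eq_chk (b :: c :: t)
    have hlen : (a :: b :: c :: t).length - 2 = t.length + 1 := by simp
    rw [hlen, List.range_succ_eq_map]
    simp only [List.any_cons, List.any_map, Function.comp_def]
    have h2 : ∀ k : Nat, ((a :: b :: c :: t)[k.succ]? == (a :: b :: c :: t)[k.succ + 2]?)
        = ((b :: c :: t)[k]? == (b :: c :: t)[k + 2]?) := by
      intro k
      simp [List.getElem?_cons_succ, Nat.succ_eq_add_one]
    simp only [h2]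
    have h0 : ((a :: b :: c :: t)[0]? == (a :: b :: c :: t)[0 + 2]?) = (a == c) := by simp
    rw [h0, pvChk_cons3, ← ih]
    have hl : (b :: c :: t).length - 2 = t.length := by simp
    rw [hl]

-- A's range-any scan equals pvChk
theorem pvAny_eq_chk (s : List Char) :
    ((PySem.List.pyRange 2 (s.length : Int) 1).any
      (fun i => PySem.List.pyGet? s (i - 2) == PySem.List.pyGet? s i)) = pvChk s := by
  rw [PySem.List.pyRange_one, List.any_map]
  have hn : (((s.length : Int)) - 2).toNat = s.length - 2 := by omega
  rw [hn, ← pvAnyNat_eq_chk]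
  congr 1
  funext k
  have e2 : (2 : Int) + (k : Int) = (((k + 2 : Nat)) : Int) := by push_cast; ring
  have e3 : (((k + 2 : Nat)) : Int) - 2 = ((k : Nat) : Int) := by push_cast; ring
  simp only [Function.comp_def, e2, e3, PySem.List.pyGet?_natCast]

-- ===== VERDICT (by name: the statement is the Claim_ definition above) =====
theorem is_valid_postcode_spec : Claim_equal_is_valid_postcode := by
  intro p _
  unfold Spec_is_valid_postcode is_valid_postcode is_valid_postcode_alt
  split
  · rfl
  · simp only [pvFoldl_split, pvAny_eq_chk, pvChk_eq_split, List.nil_append, if_true]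
    cases pvHasAdjacentDuplicate (pvSplitAlt (PySem.Int.toChars p)).1 <;>
      cases pvHasAdjacentDuplicate (pvSplitAlt (PySem.Int.toChars p)).2 <;> simp
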